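-- pv_equiv track=rewrite | github.com/JonnoB/wealthnets | wealthnet_helpers.py | rename_none_in_list
-- ===== SOURCE A (Python) =====
-- def rename_none_in_list(column_names):
--
--     """
--     Rename 'None' values in a list of column names with unique identifiers.
--
--     This function takes a list of column names `column_names` as input and renames any 'None' values in the list
--     with unique identifiers ('None_0', 'None_1', etc.). It ensures that column names are distinct after renaming.
--
--     Parameters:
--     - column_names (list): A list of column names, which may contain 'None' values.
--
--     Returns:
--     - list: A list of column names with 'None' values replaced by unique identifiers.
--
--     """
--     none_count = 0
--     new_column_names = []
--     for name in column_names: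
--         if name is None:
--             new_column_names.append(f'None_{none_count}')
--             none_count += 1
--         else:
--             new_column_names.append(name)
--     return new_column_names
-- ===== SOURCE B (Python) =====
-- def rename_none_in_list(column_names):
--     prefix = [0]
--     for name in column_names:
--         prefix.append(prefix[-1] + (name is None))
--     return [f'None_{c}' if name is None else name
--             for name, c in zip(column_names, prefix)]
-- ===== Notes on version B (the rewrite author's own statement) =====
-- stated objective: alternative
-- what changed: B is staged: a first pass builds a prefix array of running None-counts, then a zip comprehension replaces each None with the label indexed by its prefix count, instead of A's single loop threading a mutable counter and appending.
import Mathlib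
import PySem

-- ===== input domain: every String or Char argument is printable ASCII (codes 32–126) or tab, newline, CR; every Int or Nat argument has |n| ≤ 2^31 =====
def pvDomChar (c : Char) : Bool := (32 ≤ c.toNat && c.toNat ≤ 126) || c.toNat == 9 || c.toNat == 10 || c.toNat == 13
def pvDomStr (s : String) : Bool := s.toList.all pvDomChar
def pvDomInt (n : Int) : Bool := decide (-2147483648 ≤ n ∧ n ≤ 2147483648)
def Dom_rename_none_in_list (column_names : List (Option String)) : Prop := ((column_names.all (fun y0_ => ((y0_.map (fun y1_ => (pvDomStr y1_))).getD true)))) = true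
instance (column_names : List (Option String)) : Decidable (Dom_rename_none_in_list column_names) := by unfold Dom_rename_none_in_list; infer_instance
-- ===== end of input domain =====

-- B replaces A's single counter-threading loop by two stages (a prefix array of running
-- None-counts, then a zip map producing the labels); alternative decomposition, same cost.


-- ===== PORT A =====
-- literal port of A: forward loop, running counter none_count, list built by appending
def rename_none_in_list (column_names : List (Option String)) : List String :=
  (column_names.foldl
    (fun (st : Int × List String) name =>
      match name with
      | none => (st.1 + 1, st.2 ++ ["None_" ++ PySem.Int.toStr st.1])
      | some n => (st.1, st.2 ++ [n]))
    (0, [])).2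

-- ===== PORT B =====
-- literal port of Source B: stage 1 builds the prefix list of running None-counts
-- (prefix.append(prefix[-1] + (name is None))), stage 2 is the zip comprehension
def rename_none_in_list_alt (column_names : List (Option String)) : List String :=
  let pre : List Int :=        -- Python's `prefix`
    column_names.foldl
      (fun (p : List Int) name => p ++ [p.getLast! + (if name = none then 1 else 0)])
      [0]
  (column_names.zip pre).map
    (fun nc => match nc.1 with
      | none => "None_" ++ PySem.Int.toStr nc.2
      | some n => n)

-- ===== PRECONDITION & SPEC =====
def Spec_rename_none_in_list (column_names : List (Option String)) (out : List String) : Prop := out = rename_none_in_list_alt column_names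
instance (column_names : List (Option String)) (out : List String) : Decidable (Spec_rename_none_in_list column_names out) := by unfold Spec_rename_none_in_list; infer_instance

-- ===== CLAIM (what is proved, stated in full; the proofs are below) =====
def Claim_equal_rename_none_in_list : Prop := ∀ (column_names : List (Option String)), Dom_rename_none_in_list column_names → Spec_rename_none_in_list column_names (rename_none_in_list column_names)

-- ===== LEMMAS AND PROOFS =====

-- common reference: the k-th None gets label c+k, threading the count structurally
def pvG : Int → List (Option String) → List String
  | _, [] => []
  | c, none :: xs => ("None_" ++ PySem.Int.toStr c) :: pvG (c + 1) xs
  | c, some n :: xs => n :: pvG c xs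

-- reference for B's prefix list (tail after the seed), count starting at c
def pvPre : Int → List (Option String) → List Int
  | _, [] => []
  | c, none :: xs => (c + 1) :: pvPre (c + 1) xs
  | c, some _ :: xs => c :: pvPre c xs

theorem pvA_loop (xs : List (Option String)) : ∀ (c : Int) (acc : List String),
    (xs.foldl
      (fun (st : Int × List String) name =>
        match name with
        | none => (st.1 + 1, st.2 ++ ["None_" ++ PySem.Int.toStr st.1])
        | some n => (st.1, st.2 ++ [n]))
      (c, acc)).2 = acc ++ pvG c xs := by
  induction xs with
  | nil => intro c acc; simp [pvG]
  | cons x xs ih =>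
    intro c acc
    cases x with
    | none => simp [List.foldl, pvG, ih]
    | some n => simp [List.foldl, pvG, ih]

theorem pvB_prefix (xs : List (Option String)) : ∀ (p : List Int) (c : Int),
    p.getLast! = c →
    xs.foldl
      (fun (p : List Int) name => p ++ [p.getLast! + (if name = none then 1 else 0)])
      p = p ++ pvPre c xs := by
  induction xs with
  | nil => intro p c _; simp [pvPre]
  | cons x xs ih =>
    intro p c hc
    cases x with
    | none =>
      rw [List.foldl_cons]
      have h1 : p ++ [p.getLast! + (if (none : Option String) = none then 1 else 0)]
          = p ++ [c + 1] := by rw [hc]; norm_num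
      rw [h1, ih (p ++ [c + 1]) (c + 1) (by simp)]
      simp [pvPre]
    | some n =>
      rw [List.foldl_cons]
      have h1 : p ++ [p.getLast! + (if some n = none then 1 else 0)]
          = p ++ [c] := by rw [hc]; simp
      rw [h1, ih (p ++ [c]) c (by simp)]
      simp [pvPre]

theorem pvB_zip (xs : List (Option String)) : ∀ (c : Int),
    (xs.zip (c :: pvPre c xs)).map
      (fun nc => match nc.1 with
        | none => "None_" ++ PySem.Int.toStr nc.2
        | some n => n) = pvG c xs := by
  induction xs with
  | nil => intro c; simp [pvG]
  | cons x xs ih =>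
    intro c
    cases x with
    | none => simpa [pvPre, pvG] using ih (c + 1)
    | some n => simpa [pvPre, pvG] using ih c

-- ===== VERDICT (by name: the statement is the Claim_ definition above) =====
theorem rename_none_in_list_spec : Claim_equal_rename_none_in_list := by
  intro cs _
  unfold Spec_rename_none_in_list rename_none_in_list rename_none_in_list_alt
  rw [pvA_loop]
  show pvG 0 cs = _
  rw [pvB_prefix cs [0] 0 (by simp)]
  exact (pvB_zip cs 0).symm
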